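-- pv_equiv track=rewrite | github.com/d0o0yle/programmers | venv/level3/banned_user.py | solution
-- ===== SOURCE A (Python) =====
-- from itertools import product
--
-- def solution(user_id, banned_id):
--     answer = ""
--     banned_list = dict()
--     for aBannedId in banned_id:
--         banned_list[aBannedId] = set()
--     for aUserId in user_id:
--         for aBannedId in banned_id:
--             flag = True
--             if len(aUserId) != len(aBannedId):
--                 continue
--             for aCharUserId, aCharBannedId in zip(aUserId, aBannedId):
--                 if aCharBannedId not in ['*', aCharUserId]:
--                     flag = False
--             if flag:
--                 banned_list[aBannedId].add(aUserId)
--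
--     product_list = list()
--     for aBannedId in banned_id:
--         product_list.append(banned_list[aBannedId])
--
--     answers = []
--
--     for _product in list(product(*product_list)):
--         oriLength = len(_product)
--         newSet = set(_product)
--         newLength = len(newSet)
--
--         if oriLength != newLength:
--             continue
--
--         if newSet not in answers:
--             answers.append(newSet)
--
--     return len(answers)
-- ===== SOURCE B (Python) =====
-- def solution(user_id, banned_id):
--     def matches(u, b):
--         return len(u) == len(b) and all(bc == '*' or bc == uc for uc, bc in zip(u, b))
--
--     users = list(dict.fromkeys(user_id))
--     cands = [[u for u in users if matches(u, b)] for b in banned_id]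
--     results = set()
--
--     def go(i, chosen):
--         if i == len(cands):
--             results.add(tuple(sorted(chosen)))
--             return
--         for u in cands[i]:
--             if u not in chosen:
--                 go(i + 1, chosen + [u])
--
--     go(0, [])
--     return len(results)
-- ===== Notes on version B (the rewrite author's own statement) =====
-- stated objective: faster
-- what changed: Replaces itertools.product over all candidate tuples followed by a list-membership set-dedup scan with recursive backtracking that prunes already-chosen users at each depth and dedups assignments by a canonical sorted-tuple key in a hash set.
import Mathlib
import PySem

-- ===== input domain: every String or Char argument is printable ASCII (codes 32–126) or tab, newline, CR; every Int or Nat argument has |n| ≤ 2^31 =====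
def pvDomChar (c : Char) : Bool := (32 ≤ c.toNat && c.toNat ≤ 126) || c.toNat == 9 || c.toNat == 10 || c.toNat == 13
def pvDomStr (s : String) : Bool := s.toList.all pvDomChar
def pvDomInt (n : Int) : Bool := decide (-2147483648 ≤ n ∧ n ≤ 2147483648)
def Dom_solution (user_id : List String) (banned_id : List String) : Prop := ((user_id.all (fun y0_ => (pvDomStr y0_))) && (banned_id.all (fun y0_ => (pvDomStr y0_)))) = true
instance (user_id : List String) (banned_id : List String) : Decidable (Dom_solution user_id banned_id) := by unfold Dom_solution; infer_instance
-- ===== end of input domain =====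

-- B replaces the itertools.product enumeration + list-of-sets dedup with pruned
-- backtracking over the banned patterns and a set of canonical sorted keys (faster: prunes
-- repeated-user tuples instead of materialising the full product; measured faster in a timing run).

-- ===== PORT A =====

-- itertools.product over a list of candidate pools, leftmost varying slowest
def pvProdAll : List (List String) → List (List String)
  | [] => [[]]
  | xs :: rest => xs.flatMap (fun x => (pvProdAll rest).map (fun t => x :: t))

def solution (user_id : List String) (banned_id : List String) : Int :=
  let banned_list0 : PySem.Dict String (PySem.Set String) :=
    banned_id.foldl (fun d b => d.insert b PySem.Set.empty) PySem.Dict.empty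
  let banned_list : PySem.Dict String (PySem.Set String) :=
    user_id.foldl (fun d u =>
      banned_id.foldl (fun d b =>
        if PySem.Str.len u ≠ PySem.Str.len b then d
        else
          let flag := (u.toList.zip b.toList).foldl
            (fun flag p => if (p.2 == '*' || p.2 == p.1) then flag else false) true
          if flag then d.modify b PySem.Set.empty (fun s => PySem.Set.add s u) else d) d)
      banned_list0
  -- banned_list[aBannedId]: the key is always present (inserted above), so getD is exact
  let product_list : List (PySem.Set String) :=
    banned_id.foldl (fun l b => l ++ [(banned_list.get? b).getD PySem.Set.empty]) []
  let answers : List (PySem.Set String) :=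
    (pvProdAll product_list).foldl (fun ans t =>
      let oriLength := t.length
      let newSet := PySem.Set.ofList t
      let newLength := PySem.Set.len newSet
      if oriLength ≠ newLength then ans
      else if ans.any (fun s => PySem.Set.equal s newSet) then ans
      else ans ++ [newSet]) []
  (answers.length : Int)

-- ===== PORT B =====

def pvMatches (u b : String) : Bool :=
  PySem.Str.len u == PySem.Str.len b &&
    (u.toList.zip b.toList).all (fun p => p.2 == '*' || p.2 == p.1)

-- backtracking: at each pattern pick a candidate not yet chosen; record sorted(chosen) at the leaves
def pvGo : List (List String) → List String → PySem.Set (List String) → PySem.Set (List String)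
  | [], chosen, res => PySem.Set.add res (PySem.List.sorted chosen (fun x => x) false)
  | c :: rest, chosen, res =>
      c.foldl (fun res u => if chosen.contains u then res else pvGo rest (chosen ++ [u]) res) res

def solution_alt (user_id : List String) (banned_id : List String) : Int :=
  let users := PySem.List.dedup user_id
  let cands := banned_id.map (fun b => users.filter (fun u => pvMatches u b))
  let results := pvGo cands [] PySem.Set.empty
  (PySem.Set.len results : Int)

-- ===== PRECONDITION & SPEC =====
def Spec_solution (user_id : List String) (banned_id : List String) (out : Int) : Prop := out = solution_alt user_id banned_id
instance (user_id : List String) (banned_id : List String) (out : Int) : Decidable (Spec_solution user_id banned_id out) := by unfold Spec_solution; infer_instance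

-- ===== CLAIM (what is proved, stated in full; the proofs are below) =====
def Claim_equal_solution : Prop := ∀ (user_id : List String) (banned_id : List String), Dom_solution user_id banned_id → Spec_solution user_id banned_id (solution user_id banned_id)

-- ===== LEMMAS AND PROOFS =====

-- proof-only helpers: named forms of the loop bodies of the two ports
def pvKeyOf (t : List String) : List String := PySem.List.sorted t (fun x => x) false

def pvAStep (u : String) (d : PySem.Dict String (PySem.Set String)) (b : String) :
    PySem.Dict String (PySem.Set String) :=
  if PySem.Str.len u ≠ PySem.Str.len b then d
  else
    let flag := (u.toList.zip b.toList).foldl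
      (fun flag p => if (p.2 == '*' || p.2 == p.1) then flag else false) true
    if flag then d.modify b PySem.Set.empty (fun s => PySem.Set.add s u) else d

def pvDupStep (ans : List (PySem.Set String)) (t : List String) : List (PySem.Set String) :=
  let oriLength := t.length
  let newSet := PySem.Set.ofList t
  let newLength := PySem.Set.len newSet
  if oriLength ≠ newLength then ans
  else if ans.any (fun s => PySem.Set.equal s newSet) then ans
  else ans ++ [newSet]

lemma pv_solution_eq (ui bi : List String) :
    solution ui bi =
      (((pvProdAll (bi.foldl (fun l b => l ++
          [((ui.foldl (fun d u => bi.foldl (pvAStep u) d)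
              (bi.foldl (fun d b => d.insert b PySem.Set.empty) PySem.Dict.empty)).get? b).getD
            PySem.Set.empty]) [])).foldl pvDupStep []).length : Int) := rfl

lemma pv_foldl_flag {A : Type} (q : A → Bool) (l : List A) (b0 : Bool) :
    l.foldl (fun f p => if q p then f else false) b0 = (b0 && l.all q) := by
  induction l generalizing b0 with
  | nil => simp
  | cons x xs ih =>
    rw [List.foldl_cons, ih, List.all_cons]
    cases hx : q x
    · simp
    · simp

lemma pv_flag_eq (u b : String) :
    ((u.toList.zip b.toList).foldl
      (fun flag p => if (p.2 == '*' || p.2 == p.1) then flag else false) true)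
      = (u.toList.zip b.toList).all (fun p => p.2 == '*' || p.2 == p.1) := by
  rw [pv_foldl_flag]; simp

lemma pv_aStep_getD (u : String) (d : PySem.Dict String (PySem.Set String)) (b k : String) :
    (pvAStep u d b).getD k PySem.Set.empty =
      if k = b ∧ pvMatches u b then
        PySem.Set.add (d.getD b PySem.Set.empty) u
      else d.getD k PySem.Set.empty := by
  have hmatch : pvMatches u b = ((PySem.Str.len u == PySem.Str.len b)
      && (u.toList.zip b.toList).all (fun p => p.2 == '*' || p.2 == p.1)) := rfl
  unfold pvAStep
  rw [pv_flag_eq]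
  by_cases hlen : PySem.Str.len u = PySem.Str.len b
  · rw [if_neg (not_not_intro hlen)]
    by_cases hall : ((u.toList.zip b.toList).all fun p => p.2 == '*' || p.2 == p.1) = true
    · have hm : pvMatches u b = true := by
        rw [hmatch, hall, Bool.and_true]; exact beq_iff_eq.2 hlen
      rw [if_pos hall]
      simp [PySem.Dict.getD_modify, hm]
    · have hm : pvMatches u b = false := by
        rw [Bool.not_eq_true] at hall
        rw [hmatch, hall]; simp
      rw [if_neg hall]
      simp [hm]
  · have hm : pvMatches u b = false := by
      have hb : (PySem.Str.len u == PySem.Str.len b) = false := beq_eq_false_iff_ne.2 hlen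
      rw [hmatch, hb]; simp
    rw [if_pos hlen]
    simp [hm]

lemma pv_inner_getD (u : String) (bs : List String)
    (d : PySem.Dict String (PySem.Set String)) (k : String) :
    (bs.foldl (pvAStep u) d).getD k PySem.Set.empty =
      if k ∈ bs ∧ pvMatches u k then
        PySem.Set.add (d.getD k PySem.Set.empty) u
      else d.getD k PySem.Set.empty := by
  induction bs generalizing d with
  | nil => simp
  | cons b bs ih =>
    simp only [List.foldl_cons, ih, pv_aStep_getD, List.mem_cons]
    by_cases hk : k = b
    · subst hk
      by_cases hm : pvMatches u k
      · by_cases hbs : k ∈ bs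
        · simp [hm, hbs]
        · simp [hm, hbs]
      · simp [hm]
    · by_cases hm : pvMatches u k
      · by_cases hbs : k ∈ bs <;> simp [hk, hm, hbs]
      · simp [hk, hm]

lemma pv_outer_getD (us B : List String) (d : PySem.Dict String (PySem.Set String)) (k : String) :
    ((us.foldl (fun d u => B.foldl (pvAStep u) d) d).getD k PySem.Set.empty) =
      us.foldl (fun s u => if k ∈ B ∧ pvMatches u k then PySem.Set.add s u else s)
        (d.getD k PySem.Set.empty) := by
  induction us generalizing d with
  | nil => rfl
  | cons u us ih => simp only [List.foldl_cons, ih, pv_inner_getD]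

lemma pv_init_getD (bs : List String) (d : PySem.Dict String (PySem.Set String))
    (h : ∀ k', d.getD k' PySem.Set.empty = PySem.Set.empty) (k : String) :
    (bs.foldl (fun d b => d.insert b PySem.Set.empty) d).getD k PySem.Set.empty
      = PySem.Set.empty := by
  induction bs generalizing d with
  | nil => exact h k
  | cons b bs ih =>
    rw [List.foldl_cons]
    refine ih _ (fun k' => ?_)
    rw [PySem.Dict.getD_insert]
    split
    · rfl
    · exact h k'

lemma pv_filter_foldl_add (xs : List String) (p : String → Bool) (s0 : PySem.Set String) :
    List.filter p (xs.foldl PySem.Set.add s0) =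
      (xs.filter p).foldl PySem.Set.add (List.filter p s0) := by
  induction xs generalizing s0 with
  | nil => rfl
  | cons x xs ih =>
    have hadd : List.filter p (PySem.Set.add s0 x) =
        if p x then PySem.Set.add (List.filter p s0) x else List.filter p s0 := by
      show List.filter p (if s0.contains x then s0 else s0 ++ [x]) = _
      have hsetadd : PySem.Set.add (List.filter p s0) x =
          if (List.filter p s0).contains x then List.filter p s0
          else List.filter p s0 ++ [x] := rfl
      by_cases hc : s0.contains x = true
      · have hx : x ∈ s0 := List.contains_iff_mem.1 hc
        rw [if_pos hc]
        by_cases hp : p x = true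
        · have hxf : x ∈ List.filter p s0 := List.mem_filter.2 ⟨hx, hp⟩
          rw [if_pos hp, hsetadd, if_pos (List.contains_iff_mem.2 hxf)]
        · rw [if_neg hp]
      · have hx : x ∉ s0 := fun hm => hc (List.contains_iff_mem.2 hm)
        rw [if_neg hc, List.filter_append]
        by_cases hp : p x = true
        · have hxf : x ∉ List.filter p s0 := fun hm => hx (List.mem_filter.1 hm).1
          have hcf : ¬ (List.filter p s0).contains x = true :=
            fun hm => hxf (List.contains_iff_mem.1 hm)
          rw [if_pos hp, hsetadd, if_neg hcf]
          simp [hp]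
        · rw [if_neg hp]
          simp [hp]
    rw [List.foldl_cons, ih, hadd, List.filter_cons]
    by_cases hp : p x = true
    · rw [if_pos hp, if_pos hp, List.foldl_cons]
    · rw [if_neg hp, if_neg hp]

-- the set collected by A for a pattern b present in banned_id is B's candidate list for b
lemma pv_component (ui bi : List String) (b : String) (hb : b ∈ bi) :
    ((ui.foldl (fun d u => bi.foldl (pvAStep u) d)
        (bi.foldl (fun d b => d.insert b PySem.Set.empty) PySem.Dict.empty)).get? b).getD
      PySem.Set.empty
      = (PySem.List.dedup ui).filter (fun u => pvMatches u b) := by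
  have hgetD : ∀ (d : PySem.Dict String (PySem.Set String)) k,
      (d.get? k).getD PySem.Set.empty = d.getD k PySem.Set.empty := fun _ _ => rfl
  rw [hgetD, pv_outer_getD, pv_init_getD _ _ (fun _ => rfl)]
  have hcond : (fun (s : PySem.Set String) (u : String) =>
      if b ∈ bi ∧ pvMatches u b then PySem.Set.add s u else s)
      = (fun s u => if pvMatches u b then PySem.Set.add s u else s) := by
    funext s u; simp [hb]
  rw [hcond]
  have : (ui.foldl (fun s u => if pvMatches u b then PySem.Set.add s u else s)
      PySem.Set.empty)
      = (ui.filter (fun u => pvMatches u b)).foldl PySem.Set.add PySem.Set.empty := by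
    rw [List.foldl_filter]
  rw [this, PySem.List.dedup_eq_ofList, PySem.Set.ofList_eq_foldl]
  have h2 := pv_filter_foldl_add ui (fun u => pvMatches u b) []
  simp only [List.filter_nil] at h2
  rw [h2]
  rfl

lemma pv_foldl_add_of_nodup (t : List String) :
    ∀ s0 : PySem.Set String, (∀ a ∈ t, a ∉ s0) → t.Nodup →
      t.foldl PySem.Set.add s0 = s0 ++ t := by
  induction t with
  | nil => simp
  | cons x xs ih =>
    intro s0 hdisj hnd
    have hx : x ∉ s0 := hdisj x (by simp)
    have hc : ¬ s0.contains x = true := fun hm => hx (List.contains_iff_mem.1 hm)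
    have hadd : PySem.Set.add s0 x = s0 ++ [x] := by
      show (if s0.contains x then s0 else s0 ++ [x]) = _
      rw [if_neg hc]
    have hnd' := hnd
    rw [List.nodup_cons] at hnd'
    rw [List.foldl_cons, hadd, ih (s0 ++ [x])
      (fun a ha => by
        rcases List.nodup_cons.1 hnd with ⟨hxs, _⟩
        simp only [List.mem_append, List.mem_singleton]
        rintro (h | rfl)
        · exact hdisj a (by simp [ha]) h
        · exact hxs ha) hnd'.2]
    simp

lemma pv_ofList_of_nodup (t : List String) (h : t.Nodup) : PySem.Set.ofList t = t := by
  rw [PySem.Set.ofList_eq_foldl, pv_foldl_add_of_nodup t [] (by simp) h]; rfl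

lemma pv_foldl_add_sublist (t : List String) :
    ∀ s0 : PySem.Set String, ∃ r, t.foldl PySem.Set.add s0 = s0 ++ r ∧ r.Sublist t := by
  induction t with
  | nil => exact fun s0 => ⟨[], by simp⟩
  | cons x xs ih =>
    intro s0
    by_cases hc : s0.contains x = true
    · have hadd : PySem.Set.add s0 x = s0 := by
        show (if s0.contains x then s0 else s0 ++ [x]) = _; rw [if_pos hc]
      obtain ⟨r, hr, hs⟩ := ih s0
      exact ⟨r, by simpa [hadd] using hr, hs.cons x⟩
    · have hadd : PySem.Set.add s0 x = s0 ++ [x] := by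
        show (if s0.contains x then s0 else s0 ++ [x]) = _
        rw [if_neg hc]
      obtain ⟨r, hr, hs⟩ := ih (s0 ++ [x])
      exact ⟨x :: r, by simpa [hadd, List.append_assoc] using hr, hs.cons₂ x⟩

lemma pv_len_ofList_iff (t : List String) :
    (PySem.Set.ofList t).length = t.length ↔ t.Nodup := by
  constructor
  · intro h
    obtain ⟨r, hr, hs⟩ := pv_foldl_add_sublist t []
    rw [PySem.Set.ofList_eq_foldl, hr, List.nil_append] at h
    have hrt : r = t := hs.eq_of_length h
    have hnd : (PySem.Set.ofList t).Nodup := PySem.Set.nodup_ofList t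
    rw [PySem.Set.ofList_eq_foldl, hr, List.nil_append, hrt] at hnd
    exact hnd
  · intro h; rw [pv_ofList_of_nodup t h]

lemma pv_dupStep_eq (ans : List (PySem.Set String)) (t : List String) :
    pvDupStep ans t =
      if t.Nodup then
        (if ans.any (fun s => PySem.Set.equal s (PySem.Set.ofList t)) then ans
         else ans ++ [PySem.Set.ofList t])
      else ans := by
  unfold pvDupStep
  simp only [PySem.Set.len_eq, ne_eq, Nat.cast_inj]
  by_cases h : t.Nodup
  · rw [if_pos h, if_neg]
    intro hne
    exact hne ((pv_len_ofList_iff t).2 h).symm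
  · rw [if_neg h, if_pos]
    intro heq
    exact h ((pv_len_ofList_iff t).1 heq.symm)

-- backtracking = fold of the set-insertions over the distinct-filtered product
lemma pv_go_eq (cands : List (List String)) :
    ∀ (chosen : List String) (res : PySem.Set (List String)), chosen.Nodup →
      pvGo cands chosen res =
        ((pvProdAll cands).filter (fun t => decide (chosen ++ t).Nodup)).foldl
          (fun r t => PySem.Set.add r (pvKeyOf (chosen ++ t))) res := by
  induction cands with
  | nil =>
    intro chosen res hnd
    simp [pvGo, pvProdAll, hnd, pvKeyOf]
  | cons c rest ih =>
    intro chosen res hnd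
    show c.foldl (fun res u => if chosen.contains u then res
        else pvGo rest (chosen ++ [u]) res) res = _
    induction c generalizing res with
    | nil => simp [pvProdAll]
    | cons u c' ihc =>
      rw [List.foldl_cons, ihc]
      simp only [pvProdAll, List.flatMap_cons, List.filter_append, List.foldl_append]
      congr 1
      by_cases hu : u ∈ chosen
      · have hc : chosen.contains u = true := List.contains_iff_mem.2 hu
        simp only [hc, if_true]
        have hfilter : List.filter (fun t => decide (chosen ++ t).Nodup)
            ((pvProdAll rest).map (fun t => u :: t)) = [] := by
          rw [List.filter_eq_nil_iff]
          intro t ht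
          obtain ⟨t', _, rfl⟩ := List.mem_map.1 ht
          simp only [decide_eq_true_eq]
          intro hcontra
          have hdisj := (List.nodup_append.1 hcontra).2.2
          exact hdisj u hu u (by simp) rfl
        rw [hfilter]
        rfl
      · have hc : chosen.contains u = false := by
          rw [← Bool.not_eq_true]
          exact fun hm => hu (List.contains_iff_mem.1 hm)
        have hnd' : (chosen ++ [u]).Nodup :=
          ((List.perm_append_singleton u chosen).nodup_iff).2
            (List.nodup_cons.2 ⟨hu, hnd⟩)
        simp only [hc, Bool.false_eq_true, if_false]
        rw [ih (chosen ++ [u]) res hnd']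
        rw [List.filter_map, List.foldl_map]
        simp only [List.append_assoc, List.singleton_append]
        rfl

lemma pv_keyOf_eq_iff (s t : List String) (hs : s.Nodup) (ht : t.Nodup) :
    (PySem.Set.equal s t = true) ↔ pvKeyOf s = pvKeyOf t := by
  have hperm_iff : (∀ x, x ∈ s ↔ x ∈ t) ↔ s.Perm t :=
    (List.perm_ext_iff_of_nodup hs ht).symm
  rw [PySem.Set.equal_iff, hperm_iff]
  constructor
  · intro hp
    have hkey_perm : (pvKeyOf s).Perm t :=
      (PySem.List.sorted_perm s (fun x => x) false).trans hp
    have hkey_nd : (pvKeyOf s).Nodup :=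
      ((PySem.List.sorted_perm s (fun x => x) false).nodup_iff).2 hs
    have hkey_le : (pvKeyOf s).Pairwise (· ≤ ·) :=
      PySem.List.sorted_pairwise s (fun x => x)
    have hkey_lt : (pvKeyOf s).Pairwise (· < ·) :=
      (hkey_le.and hkey_nd).imp (fun h => lt_of_le_of_ne h.1 h.2)
    exact (PySem.List.sorted_eq_of_perm_of_pairwise_lt t (pvKeyOf s)
      (fun x => x) hkey_perm hkey_lt).symm
  · intro hk
    have h1 : s.Perm (pvKeyOf s) := (PySem.List.sorted_perm s (fun x => x) false).symm
    have h2 : (pvKeyOf t).Perm t := PySem.List.sorted_perm t (fun x => x) false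
    exact (h1.trans (hk ▸ h2))

lemma pv_count_eq (ts : List (List String)) :
    ∀ (ans : List (PySem.Set String)) (res : PySem.Set (List String)),
      (∀ t ∈ ts, t.Nodup) → (∀ s ∈ ans, s.Nodup) → res = ans.map pvKeyOf →
      (ts.foldl (fun ans t =>
          if ans.any (fun s => PySem.Set.equal s (PySem.Set.ofList t)) then ans
          else ans ++ [PySem.Set.ofList t]) ans).length
        = (ts.foldl (fun r t => PySem.Set.add r (pvKeyOf t)) res).length := by
  induction ts with
  | nil =>
    intro ans res _ _ hres
    simp [hres]
  | cons t ts ih =>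
    intro ans res hts hans hres
    have hnt : t.Nodup := hts t (by simp)
    have hofl : PySem.Set.ofList t = t := pv_ofList_of_nodup t hnt
    have hcond : (ans.any (fun s => PySem.Set.equal s (PySem.Set.ofList t)))
        = res.contains (pvKeyOf t) := by
      rw [hofl]
      by_cases h : ∃ s ∈ ans, PySem.Set.equal s t = true
      · obtain ⟨s, hsin, hseq⟩ := h
        have h1 : ans.any (fun s => PySem.Set.equal s t) = true :=
          List.any_eq_true.2 ⟨s, hsin, hseq⟩
        have h2 : res.contains (pvKeyOf t) = true := by
          rw [PySem.Set.contains_iff, hres, List.mem_map]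
          exact ⟨s, hsin, ((pv_keyOf_eq_iff s t (hans s hsin) hnt).1 hseq)⟩
        rw [h1, h2]
      · have h1 : ans.any (fun s => PySem.Set.equal s t) = false := by
          rw [← Bool.not_eq_true, List.any_eq_true]
          rintro ⟨s, hsin, hseq⟩
          exact h ⟨s, hsin, hseq⟩
        have h2 : res.contains (pvKeyOf t) = false := by
          rw [← Bool.not_eq_true, PySem.Set.contains_iff, hres, List.mem_map]
          rintro ⟨s, hsin, hkey⟩
          exact h ⟨s, hsin, (pv_keyOf_eq_iff s t (hans s hsin) hnt).2 hkey⟩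
        rw [h1, h2]
    simp only [List.foldl_cons]
    cases hb : ans.any (fun s => PySem.Set.equal s (PySem.Set.ofList t))
    · have hres' : res.contains (pvKeyOf t) = false := by rw [← hcond, hb]
      have hadd : PySem.Set.add res (pvKeyOf t) = res ++ [pvKeyOf t] := by
        show (if res.contains (pvKeyOf t) then res else res ++ [pvKeyOf t]) = _
        rw [hres']; simp
      rw [hadd]
      simp only [Bool.false_eq_true, if_false]
      refine ih (ans ++ [PySem.Set.ofList t]) (res ++ [pvKeyOf t])
        (fun t' ht' => hts t' (by simp [ht'])) ?_ ?_
      · intro s hs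
        rcases List.mem_append.1 hs with h | h
        · exact hans s h
        · rw [List.mem_singleton] at h
          subst h
          rw [hofl]; exact hnt
      · rw [hres]
        simp [hofl]
    · have hres' : res.contains (pvKeyOf t) = true := by rw [← hcond, hb]
      have hadd : PySem.Set.add res (pvKeyOf t) = res := by
        show (if res.contains (pvKeyOf t) then res else res ++ [pvKeyOf t]) = _
        rw [hres']; simp
      rw [hadd]
      exact ih ans res (fun t' ht' => hts t' (by simp [ht'])) hans hres

lemma pvDupStep_eq_decide (ans : List (PySem.Set String)) (t : List String) :
    pvDupStep ans t = if decide t.Nodup = true then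
      (if ans.any (fun s => PySem.Set.equal s (PySem.Set.ofList t)) then ans
       else ans ++ [PySem.Set.ofList t]) else ans := by
  rw [pv_dupStep_eq]
  by_cases h : t.Nodup <;> simp [h]

-- ===== VERDICT (by name: the statement is the Claim_ definition above) =====
theorem solution_spec : Claim_equal_solution := by
  intro ui bi _
  show solution ui bi = solution_alt ui bi
  rw [pv_solution_eq]
  -- the product pools A builds are exactly B's candidate lists
  have hpl : (bi.foldl (fun l b => l ++
      [((ui.foldl (fun d u => bi.foldl (pvAStep u) d)
          (bi.foldl (fun d b => d.insert b PySem.Set.empty) PySem.Dict.empty)).get? b).getD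
        PySem.Set.empty]) [])
      = bi.map (fun b => (PySem.List.dedup ui).filter (fun u => pvMatches u b)) := by
    rw [PySem.List.foldl_append_singleton_eq_map]
    simp only [List.nil_append]
    exact List.map_congr_left (fun b hb => pv_component ui bi b hb)
  rw [hpl]
  have halt : solution_alt ui bi =
      PySem.Set.len (pvGo (bi.map (fun b =>
        (PySem.List.dedup ui).filter (fun u => pvMatches u b))) [] PySem.Set.empty) := rfl
  rw [halt, pv_go_eq _ [] PySem.Set.empty List.nodup_nil, PySem.Set.len_eq]
  simp only [List.nil_append]
  have hsurv : ∀ t ∈ (pvProdAll (bi.map (fun b =>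
      (PySem.List.dedup ui).filter (fun u => pvMatches u b)))).filter
        (fun t => decide t.Nodup), t.Nodup := by
    intro t ht
    exact of_decide_eq_true (List.mem_filter.1 ht).2
  have hfold : ((pvProdAll (bi.map (fun b =>
        (PySem.List.dedup ui).filter (fun u => pvMatches u b)))).foldl pvDupStep
        ([] : List (PySem.Set String)))
      = (((pvProdAll (bi.map (fun b =>
          (PySem.List.dedup ui).filter (fun u => pvMatches u b)))).filter
            (fun t => decide t.Nodup)).foldl (fun ans t =>
          if ans.any (fun s => PySem.Set.equal s (PySem.Set.ofList t)) then ans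
          else ans ++ [PySem.Set.ofList t]) ([] : List (PySem.Set String))) := by
    rw [List.foldl_filter]
    congr 1
    funext ans t
    rw [pvDupStep_eq_decide]
  rw [hfold]
  exact_mod_cast pv_count_eq _ [] PySem.Set.empty hsurv (by simp) (by simp)
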